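-- pv_equiv track=rewrite | github.com/mohi-othman/mohi-euler-python | ProjectEuler/ProjectEuler/Euler079b.py | shorten
-- ===== SOURCE A (Python) =====
-- def shorten(node1, node2):
--     length = min((len(node1),len(node2)))
--     result = node1 + node2
--     for i in range(length,0,-1):
--         if node1[-i:]==node2[:i]:
--             result = node1[:len(node1)-i] + node2
--             break
--     return result
-- ===== SOURCE B (Python) =====
-- def shorten(node1, node2):
--     # NFA-style single forward pass over node1: maintain the set of live match
--     # lengths k (node2[:k] is a suffix of the prefix read so far); merge at max.
--     m = len(node2)
--     live = []
--     for c in node1: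
--         nxt = [k + 1 for k in live if k < m and node2[k] == c]
--         if m and node2[0] == c:
--             nxt.append(1)
--         live = nxt
--     best = max(live, default=0)
--     return node1[:len(node1) - best] + node2
-- ===== Notes on version B (the rewrite author's own statement) =====
-- stated objective: alternative
-- what changed: B replaces A's downward loop over candidate overlap lengths with fresh slice comparisons by a single forward pass over node1 that simulates the prefix-matching NFA of node2 (a set of live match lengths advanced one character at a time), then merges at the maximum surviving length.
import Mathlib
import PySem

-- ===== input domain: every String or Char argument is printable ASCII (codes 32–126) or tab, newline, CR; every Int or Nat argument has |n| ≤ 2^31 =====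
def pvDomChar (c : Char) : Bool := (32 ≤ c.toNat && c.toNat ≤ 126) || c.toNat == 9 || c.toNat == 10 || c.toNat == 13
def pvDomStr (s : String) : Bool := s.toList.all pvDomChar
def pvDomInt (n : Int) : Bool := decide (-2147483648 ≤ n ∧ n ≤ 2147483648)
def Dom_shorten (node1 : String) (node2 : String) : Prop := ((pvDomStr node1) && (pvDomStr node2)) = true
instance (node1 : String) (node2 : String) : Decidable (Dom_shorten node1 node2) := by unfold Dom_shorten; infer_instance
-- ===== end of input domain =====

-- B replaces A's downward loop over overlap lengths (slice compare, break) by one forward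
-- pass over node1 simulating the prefix-matching NFA of node2 (a set of live match lengths),
-- then merges at the maximum surviving length; equivalence is proved on all inputs.

-- ===== PORT A =====
-- the for-loop over range(length, 0, -1) with its break, as structural recursion over the range list
def shortenLoopA (n1 n2 : List Char) : List Int → List Char → List Char
  | [], result => result
  | i :: rest, result =>
    if PySem.List.slice n1 (some (-i)) none == PySem.List.slice n2 none (some i) then
      PySem.List.slice n1 none (some ((n1.length : Int) - i)) ++ n2   -- result = node1[:len(node1)-i] + node2; break
    else shortenLoopA n1 n2 rest result

def shorten (node1 : String) (node2 : String) : String :=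
  let n1 := node1.toList
  let n2 := node2.toList
  let length : Int := min (n1.length : Int) (n2.length : Int)
  let result := n1 ++ n2
  String.ofList (shortenLoopA n1 n2 (PySem.List.pyRange length 0 (-1)) result)

-- ===== PORT B =====
-- one iteration of the for-loop body: nxt = [k+1 for k in live if k < m and node2[k]==c]; append 1 if node2[0]==c
-- (node2[k] read under the guard k < m, so getD is exact)
def stepB (n2 : List Char) (live : List Nat) (c : Char) : List Nat :=
  let nxt := (live.filter (fun k => decide (k < n2.length) && (n2.getD k 'a' == c))).map (· + 1)
  if (n2.length != 0) && (n2.getD 0 'a' == c) then nxt ++ [1] else nxt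

def shorten_alt (node1 : String) (node2 : String) : String :=
  let n1 := node1.toList
  let n2 := node2.toList
  let live := n1.foldl (stepB n2) []
  let best := (PySem.List.max? live (fun k => k)).getD 0   -- max(live, default=0)
  String.ofList (n1.take (n1.length - best) ++ n2)

-- ===== PRECONDITION & SPEC =====
def Spec_shorten (node1 : String) (node2 : String) (out : String) : Prop := out = shorten_alt node1 node2
instance (node1 : String) (node2 : String) (out : String) : Decidable (Spec_shorten node1 node2 out) := by unfold Spec_shorten; infer_instance

-- ===== CLAIM (what is proved, stated in full; the proofs are below) =====
def Claim_equal_shorten : Prop := ∀ (node1 : String) (node2 : String), Dom_shorten node1 node2 → Spec_shorten node1 node2 (shorten node1 node2)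

-- ===== LEMMAS AND PROOFS =====

-- B's shrink loop from the previous analysis of A, reused as the common middle ground:
-- chop the longest suffix of the candidate until it is a prefix of n2
def chopB (n2 : List Char) : List Char → List Char
  | [] => []
  | c :: t => if PySem.Chars.startswith n2 (c :: t) then c :: t else chopB n2 t

-- k is a live overlap after reading p: n2's k-prefix is p's k-suffix
def Ov (n2 p : List Char) (k : Nat) : Prop :=
  1 ≤ k ∧ k ≤ n2.length ∧ k ≤ p.length ∧ n2.take k = p.drop (p.length - k)

-- ---------- A-side: the countdown loop equals the chop loop (proved previously) ----------
lemma loopA_eq_chopB (n1 n2 : List Char) (j : Nat) (hj1 : j ≤ n1.length) (hj2 : j ≤ n2.length) :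
    shortenLoopA n1 n2 (PySem.List.pyRange (j : Int) 0 (-1)) (n1 ++ n2)
      = n1.take (n1.length - (chopB n2 (n1.drop (n1.length - j))).length) ++ n2 := by
  induction j with
  | zero =>
      rw [PySem.List.pyRange_neg_one_eq_nil (by norm_num)]
      simp [shortenLoopA, chopB]
  | succ j ih =>
      have hcons : PySem.List.pyRange ((j + 1 : Nat) : Int) 0 (-1)
          = ((j + 1 : Nat) : Int) :: PySem.List.pyRange ((j : Nat) : Int) 0 (-1) := by
        have := PySem.List.pyRange_neg_one_cons (a := ((j + 1 : Nat) : Int)) (b := 0) (by positivity)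
        rw [this]; norm_num
      rw [hcons]
      set s : List Char := n1.drop (n1.length - (j + 1)) with hs
      have hslen : s.length = j + 1 := by simp [hs]; omega
      have hsne : s ≠ [] := by intro h; rw [h] at hslen; simp at hslen
      obtain ⟨c, t, hct⟩ := List.exists_cons_of_ne_nil hsne
      have hcond : (PySem.List.slice n1 (some (-((j + 1 : Nat) : Int))) none
            == PySem.List.slice n2 none (some ((j + 1 : Nat) : Int)))
          = PySem.Chars.startswith n2 s := by
        rw [PySem.List.slice_from_neg_natCast n1 (j + 1) (by omega),
            PySem.List.slice_to_natCast, ← hs]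
        rcases h : PySem.Chars.startswith n2 s with _ | _
        · simp only [beq_eq_false_iff_ne, ne_eq]
          intro heq
          have : s <+: n2 := by
            rw [heq]; exact List.take_prefix _ _
          rw [(PySem.Chars.startswith_iff n2 s).symm.mp this] at h; exact absurd h (by simp)
        · have : s <+: n2 := (PySem.Chars.startswith_iff n2 s).mp h
          have heq : s = n2.take s.length := List.prefix_iff_eq_take.mp this
          rw [hslen] at heq
          simp [heq]
      simp only [shortenLoopA, hcond]
      rcases h : PySem.Chars.startswith n2 s with _ | _
      · have htail : s.tail = n1.drop (n1.length - j) := by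
          rw [hs, List.tail_drop]
          congr 1; omega
        have hchop : chopB n2 s = chopB n2 (n1.drop (n1.length - j)) := by
          have ht : t = n1.drop (n1.length - j) := by rw [← htail, hct, List.tail_cons]
          rw [hct, chopB, ← hct, h]
          simp only [Bool.false_eq_true, if_false]
          rw [ht]
        simp only [hchop]
        exact ih (by omega) (by omega)
      · have hchop : chopB n2 s = s := by rw [hct, chopB, ← hct, h]; simp
        rw [if_pos rfl, PySem.List.slice_to n1 (by push_cast; omega)]
        simp only [hchop, hslen]
        congr 2
        omega

-- ---------- chopB's result is the greatest live overlap ----------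
lemma chopB_suffix (n2 : List Char) : ∀ l, chopB n2 l <:+ l := by
  intro l
  induction l with
  | nil => simp [chopB]
  | cons c t ih =>
      rw [chopB]
      split
      · exact List.suffix_refl _
      · exact ih.trans (List.suffix_cons c t)

lemma chopB_startswith (n2 : List Char) : ∀ l, PySem.Chars.startswith n2 (chopB n2 l) = true := by
  intro l
  induction l with
  | nil =>
      rw [chopB, PySem.Chars.startswith_iff]
      exact List.nil_prefix
  | cons c t ih =>
      rw [chopB]
      split
      · assumption
      · exact ih

lemma chopB_max (n2 : List Char) : ∀ l t, t <:+ l → PySem.Chars.startswith n2 t = true →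
    t.length ≤ (chopB n2 l).length := by
  intro l
  induction l with
  | nil => intro t ht _; rw [List.suffix_nil.mp ht]; simp
  | cons c l' ih =>
      intro t ht hsw
      rw [chopB]
      split
      · calc t.length ≤ (c :: l').length := ht.length_le
          _ = _ := rfl
      · rename_i hno
        rcases List.suffix_cons_iff.mp ht with h | h
        · rw [h] at hsw; exact absurd hsw (by simp [hno])
        · exact ih t h hsw

-- suffix of a list is determined by its length
lemma suffix_eq_drop {t l : List Char} (h : t <:+ l) : t = l.drop (l.length - t.length) := by
  obtain ⟨s, rfl⟩ := h
  simp

lemma chopB_Ov (n1 n2 : List Char) :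
    (chopB n2 (n1.drop (n1.length - min n1.length n2.length))).length = 0
    ∨ Ov n2 n1 (chopB n2 (n1.drop (n1.length - min n1.length n2.length))).length := by
  set cand := n1.drop (n1.length - min n1.length n2.length) with hcand
  set ch := chopB n2 cand with hch
  by_cases h0 : ch.length = 0
  · exact Or.inl h0
  right
  have hsufc : ch <:+ cand := chopB_suffix n2 cand
  have hsuf1 : ch <:+ n1 := hsufc.trans (List.drop_suffix _ _)
  have hpre : ch <+: n2 := (PySem.Chars.startswith_iff n2 ch).mp (chopB_startswith n2 cand)
  refine ⟨by omega, hpre.length_le, hsuf1.length_le, ?_⟩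
  have h1 := List.prefix_iff_eq_take.mp hpre
  have h2 := suffix_eq_drop hsuf1
  rw [← h1, ← h2]

lemma le_chopB (n1 n2 : List Char) (k : Nat) (h : Ov n2 n1 k) :
    k ≤ (chopB n2 (n1.drop (n1.length - min n1.length n2.length))).length := by
  obtain ⟨h1, h2, h3, h4⟩ := h
  set m := min n1.length n2.length with hm
  have hkm : k ≤ m := by omega
  set t := n1.drop (n1.length - k) with ht
  have htlen : t.length = k := by simp [ht]; omega
  have htsuf : t <:+ n1.drop (n1.length - m) := by
    have : (n1.drop (n1.length - m)).drop (m - k) = t := by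
      rw [List.drop_drop, ht]; congr 1; omega
    rw [← this]; exact List.drop_suffix _ _
  have htsw : PySem.Chars.startswith n2 t = true := by
    rw [PySem.Chars.startswith_iff]
    rw [← h4, ht.symm] at *
    exact ⟨n2.drop k, by rw [← h4]; simp⟩
  calc k = t.length := htlen.symm
    _ ≤ _ := chopB_max n2 _ t htsuf htsw

-- ---------- B-side: membership in the live set characterizes overlaps ----------
lemma mem_stepB (n2 : List Char) (live : List Nat) (c : Char) (k' : Nat) :
    k' ∈ stepB n2 live c
      ↔ (∃ k ∈ live, k < n2.length ∧ n2.getD k 'a' = c ∧ k' = k + 1)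
        ∨ (k' = 1 ∧ n2 ≠ [] ∧ n2.getD 0 'a' = c) := by
  unfold stepB
  split
  · rename_i hc
    simp only [Bool.and_eq_true, bne_iff_ne, ne_eq, beq_iff_eq] at hc
    simp only [List.mem_append, List.mem_singleton, List.mem_map, List.mem_filter,
      Bool.and_eq_true, decide_eq_true_eq, beq_iff_eq]
    constructor
    · rintro (⟨k, ⟨hk, hlt, heq⟩, rfl⟩ | rfl)
      · exact Or.inl ⟨k, hk, hlt, heq, rfl⟩
      · exact Or.inr ⟨rfl, fun h => hc.1 (by simp [h]), hc.2⟩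
    · rintro (⟨k, hk, hlt, heq, rfl⟩ | ⟨rfl, _, _⟩)
      · exact Or.inl ⟨k, ⟨hk, hlt, heq⟩, rfl⟩
      · exact Or.inr rfl
  · rename_i hc
    simp only [Bool.and_eq_true, bne_iff_ne, ne_eq, beq_iff_eq, not_and_or, not_not] at hc
    simp only [List.mem_map, List.mem_filter, Bool.and_eq_true, decide_eq_true_eq, beq_iff_eq]
    constructor
    · rintro ⟨k, ⟨hk, hlt, heq⟩, rfl⟩
      exact Or.inl ⟨k, hk, hlt, heq, rfl⟩
    · rintro (⟨k, hk, hlt, heq, rfl⟩ | ⟨rfl, hne, h0⟩)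
      · exact ⟨k, ⟨hk, hlt, heq⟩, rfl⟩
      · rcases hc with h | h
        · exact absurd (List.length_eq_zero_iff.mp h) hne
        · exact absurd h0 h
    
-- extending the read prefix by one character
lemma Ov_append (n2 p : List Char) (c : Char) (k' : Nat) :
    Ov n2 (p ++ [c]) k'
      ↔ (∃ k, Ov n2 p k ∧ k < n2.length ∧ n2.getD k 'a' = c ∧ k' = k + 1)
        ∨ (k' = 1 ∧ n2 ≠ [] ∧ n2.getD 0 'a' = c) := by
  unfold Ov
  constructor
  · rintro ⟨h1, h2, h3, h4⟩
    obtain ⟨k, rfl⟩ : ∃ k, k' = k + 1 := ⟨k' - 1, by omega⟩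
    have hlen : (p ++ [c]).length = p.length + 1 := by simp
    have hkp : k ≤ p.length := by simp at h3; omega
    have hdrop : (p ++ [c]).drop ((p ++ [c]).length - (k + 1)) = p.drop (p.length - k) ++ [c] := by
      rw [hlen, show p.length + 1 - (k + 1) = p.length - k by omega,
          List.drop_append_of_le_length (by omega)]
    have htake : n2.take (k + 1) = n2.take k ++ [n2.getD k 'a'] := by
      rw [List.take_add_one]
      congr 1
      rw [List.getElem?_eq_getElem (by omega)]
      simp [List.getD, List.getElem?_eq_getElem (show k < n2.length by omega)]
    rw [hdrop, htake] at h4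
    obtain ⟨he1, he2⟩ := List.append_inj' h4 rfl
    rcases Nat.eq_zero_or_pos k with rfl | hk1
    · exact Or.inr ⟨rfl, by intro h; subst h; simp at h2, by simpa using he2⟩
    · exact Or.inl ⟨k, ⟨hk1, by omega, hkp, he1⟩, by omega, by simpa using he2, rfl⟩
  · rintro (⟨k, ⟨h1, h2, h3, h4⟩, hlt, heq, rfl⟩ | ⟨rfl, hne, h0⟩)
    · refine ⟨by omega, by omega, by simp; omega, ?_⟩
      have hdrop : (p ++ [c]).drop ((p ++ [c]).length - (k + 1)) = p.drop (p.length - k) ++ [c] := by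
        simp only [List.length_append, List.length_singleton]
        rw [show p.length + 1 - (k + 1) = p.length - k by omega,
            List.drop_append_of_le_length (by omega)]
      have htake : n2.take (k + 1) = n2.take k ++ [n2.getD k 'a'] := by
        rw [List.take_add_one]
        congr 1
        rw [List.getElem?_eq_getElem (by omega)]
        simp [List.getD, List.getElem?_eq_getElem (show k < n2.length by omega)]
      rw [hdrop, htake, h4, heq]
    · have hn2 : 0 < n2.length := List.length_pos_iff.mpr hne
      refine ⟨le_refl 1, hn2, by simp, ?_⟩
      have : (p ++ [c]).drop ((p ++ [c]).length - 1) = [c] := by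
        simp only [List.length_append, List.length_singleton]
        rw [show p.length + 1 - 1 = p.length by omega, List.drop_append_of_le_length (le_refl _)]
        simp
      rw [this, List.take_one]
      rw [← h0]
      simp [List.getD, List.head?_eq_getElem?, List.getElem?_eq_getElem hn2]

lemma live_char (n2 : List Char) : ∀ (p : List Char) (k : Nat),
    k ∈ p.foldl (stepB n2) [] ↔ Ov n2 p k := by
  intro p
  induction p using List.reverseRecOn with
  | nil => intro k; simp [Ov]; intro h _ h3; omega
  | append_singleton p c ih =>
      intro k
      rw [List.foldl_append, List.foldl_cons, List.foldl_nil, mem_stepB, Ov_append]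
      constructor
      · rintro (⟨j, hj, hlt, heq, rfl⟩ | h)
        · exact Or.inl ⟨j, (ih j).mp hj, hlt, heq, rfl⟩
        · exact Or.inr h
      · rintro (⟨j, hj, hlt, heq, rfl⟩ | h)
        · exact Or.inl ⟨j, (ih j).mpr hj, hlt, heq, rfl⟩
        · exact Or.inr h

-- ---------- the two maxima coincide ----------
lemma best_eq_chop (n1 n2 : List Char) :
    ((PySem.List.max? (n1.foldl (stepB n2) []) (fun k => k)).getD 0)
      = (chopB n2 (n1.drop (n1.length - min n1.length n2.length))).length := by
  set live := n1.foldl (stepB n2) [] with hlive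
  set ch := (chopB n2 (n1.drop (n1.length - min n1.length n2.length))).length with hch
  rcases hmax : PySem.List.max? live (fun k => k) with _ | b
  · -- live empty: no overlaps, so ch = 0 too
    have hnil : live = [] := (PySem.List.max?_eq_none_iff _ _).mp hmax
    simp only [Option.getD_none]
    rcases chopB_Ov n1 n2 with h | h
    · omega
    · exfalso
      have : ch ∈ live := (live_char n2 n1 ch).mpr h
      rw [hnil] at this; simp at this
  · simp only [Option.getD_some]
    have hb : b ∈ live := PySem.List.max?_mem hmax
    have hOvb : Ov n2 n1 b := (live_char n2 n1 b).mp hb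
    have h1 : b ≤ ch := le_chopB n1 n2 b hOvb
    have h2 : ch ≤ b := by
      rcases chopB_Ov n1 n2 with h | h
      · omega
      · have : ch ∈ live := (live_char n2 n1 ch).mpr h
        exact PySem.List.max?_isMax hmax ch this
    omega

theorem shorten_eq (node1 node2 : String) : shorten node1 node2 = shorten_alt node1 node2 := by
  unfold shorten shorten_alt
  have hmin : (min (node1.toList.length : Int) (node2.toList.length : Int))
      = ((min node1.toList.length node2.toList.length : Nat) : Int) := by push_cast; rfl
  simp only [hmin]
  rw [loopA_eq_chopB _ _ _ (Nat.min_le_left _ _) (Nat.min_le_right _ _), best_eq_chop]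

-- ===== VERDICT (by name: the statement is the Claim_ definition above) =====
theorem shorten_spec : Claim_equal_shorten := by
  intro node1 node2 _
  unfold Spec_shorten
  exact shorten_eq node1 node2
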